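-- pv_equiv track=rewrite | github.com/Yoni-Berihun/coding-challenges | custom/arrays/even_odd_analysis.py | function
-- ===== SOURCE A (Python) =====
-- def function(arr):
--     evencount = 0
--     oddcount = 0
--     sumofeven = 0
--     sumofodd = 0
--
--     for num in arr:
--         if num % 2 == 0:
--             evencount += 1
--             sumofeven += num
--         else:
--             oddcount += 1
--             sumofodd += num
--     if evencount > oddcount:
--         return sumofeven
--     if oddcount >evencount:
--         return sumofodd
--     else:
--         if sumofeven > sumofodd:
--             return sumofeven - sumofodd
--         else:
--             return sumofodd - sumofeven
-- ===== SOURCE B (Python) =====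
-- def function(arr):
--     # Parity-arithmetic decomposition: x % 2 in Python is 0 or 1 even for
--     # negatives, so the odd count is sum(x % 2 ...), the signed even/odd
--     # balance is n - 2*noddd, and the even sum is derived as total - oddsum.
--     n = len(arr)
--     total = sum(arr)
--     nodd = sum(x % 2 for x in arr)
--     oddsum = sum(x for x in arr if x % 2)
--     bal = n - 2 * nodd
--     if bal > 0:
--         return total - oddsum
--     if bal < 0:
--         return oddsum
--     return abs(total - 2 * oddsum)
-- ===== Notes on version B (the rewrite author's own statement) =====
-- stated objective: alternative
-- what changed: Replaces A's fused loop over four branch-updated accumulators with branch-free parity arithmetic: odd count as sum(x % 2), a signed even/odd balance n - 2*nodd deciding the cascade, even sum derived as total - oddsum rather than accumulated, and the tie branch collapsed to abs(total - 2*oddsum).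
import Mathlib
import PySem

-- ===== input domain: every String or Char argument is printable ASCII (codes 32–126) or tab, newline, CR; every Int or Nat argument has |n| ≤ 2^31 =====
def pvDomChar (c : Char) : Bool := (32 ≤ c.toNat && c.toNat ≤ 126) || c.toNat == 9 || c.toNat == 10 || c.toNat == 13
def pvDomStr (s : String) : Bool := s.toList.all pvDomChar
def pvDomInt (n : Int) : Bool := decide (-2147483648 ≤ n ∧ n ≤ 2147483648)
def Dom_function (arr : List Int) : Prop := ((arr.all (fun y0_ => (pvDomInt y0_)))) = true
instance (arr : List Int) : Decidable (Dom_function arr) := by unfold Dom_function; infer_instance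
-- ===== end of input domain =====

-- B replaces A's fused four-accumulator loop with branch-free parity arithmetic:
-- odd count as the sum of x % 2, a signed balance n - 2*nodd deciding the cascade,
-- even sum derived as total - oddsum, tie branch collapsed to an absolute value.

-- ===== PORT A =====
def function (arr : List Int) : Int :=
  let s := arr.foldl
    (fun (st : Int × Int × Int × Int) num =>
      let (ec, oc, se, so) := st
      if PySem.Int.mod num 2 = 0 then (ec + 1, oc, se + num, so)
      else (ec, oc + 1, se, so + num))
    (0, 0, 0, 0)
  let (ec, oc, se, so) := s
  if ec > oc then se
  else if oc > ec then so
  else if se > so then se - so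
  else so - se

-- ===== PORT B =====
def function_alt (arr : List Int) : Int :=
  let n : Int := arr.length
  let total := arr.sum
  let nodd := (arr.map (fun x => PySem.Int.mod x 2)).sum
  let oddsum := (arr.filter (fun x => PySem.Int.mod x 2 ≠ 0)).sum
  let bal := n - 2 * nodd
  if bal > 0 then total - oddsum
  else if bal < 0 then oddsum
  else |total - 2 * oddsum|

-- ===== PRECONDITION & SPEC =====
def Spec_function (arr : List Int) (out : Int) : Prop := out = function_alt arr
instance (arr : List Int) (out : Int) : Decidable (Spec_function arr out) := by unfold Spec_function; infer_instance

-- ===== CLAIM (what is proved, stated in full; the proofs are below) =====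
def Claim_equal_function : Prop := ∀ (arr : List Int), Dom_function arr → Spec_function arr (function arr)

-- ===== LEMMAS AND PROOFS =====

-- A's fold state over any prefix equals the partition aggregates plus the initial state.
theorem function_fold_eq (arr : List Int) (ec oc se so : Int) :
    arr.foldl
      (fun (st : Int × Int × Int × Int) num =>
        let (ec, oc, se, so) := st
        if PySem.Int.mod num 2 = 0 then (ec + 1, oc, se + num, so)
        else (ec, oc + 1, se, so + num))
      (ec, oc, se, so)
    = (ec + (arr.filter (fun x => PySem.Int.mod x 2 = 0)).length,
       oc + (arr.filter (fun x => PySem.Int.mod x 2 ≠ 0)).length,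
       se + (arr.filter (fun x => PySem.Int.mod x 2 = 0)).sum,
       so + (arr.filter (fun x => PySem.Int.mod x 2 ≠ 0)).sum) := by
  induction arr generalizing ec oc se so with
  | nil => simp
  | cons a t ih =>
    simp only [List.foldl_cons, List.filter_cons]
    by_cases h : PySem.Int.mod a 2 = 0 <;>
      simp only [h, ne_eq, decide_true, decide_false, not_true_eq_false, not_false_eq_true,
        if_true, if_false, ih, List.length_cons, List.sum_cons] <;>
      refine Prod.ext ?_ (Prod.ext ?_ (Prod.ext ?_ ?_)) <;> push_cast <;> omega

-- B's parity-arithmetic aggregates, expressed through the same partition quantities.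
theorem function_alt_agg (arr : List Int) :
    (arr.map (fun x => PySem.Int.mod x 2)).sum
        = ((arr.filter (fun x => PySem.Int.mod x 2 ≠ 0)).length : Int)
    ∧ arr.sum = (arr.filter (fun x => PySem.Int.mod x 2 = 0)).sum
        + (arr.filter (fun x => PySem.Int.mod x 2 ≠ 0)).sum
    ∧ (arr.length : Int) = ((arr.filter (fun x => PySem.Int.mod x 2 = 0)).length : Int)
        + ((arr.filter (fun x => PySem.Int.mod x 2 ≠ 0)).length : Int) := by
  induction arr with
  | nil => simp
  | cons a t ih =>
    obtain ⟨h1, h2, h3⟩ := ih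
    have e10 : ((1:Int) = 0) = False := by simp
    simp only [ne_eq] at h1 h2 h3
    rcases PySem.Int.mod_two_eq a with h | h <;>
      simp only [List.map_cons, List.sum_cons, List.filter_cons, ne_eq, h,
        decide_eq_true_eq, eq_self_iff_true, e10, not_true, not_false_iff,
        if_true, if_false, List.length_cons, List.sum_cons, h1, h2, h3] <;>
      refine ⟨?_, ?_, ?_⟩ <;> push_cast [h1, h2, h3] <;> omega

-- ===== VERDICT (by name: the statement is the Claim_ definition above) =====
theorem function_spec : Claim_equal_function := by
  intro arr _
  unfold Spec_function function function_alt
  obtain ⟨h1, h2, h3⟩ := function_alt_agg arr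
  rw [function_fold_eq]
  simp only [zero_add, h1, h2, h3]
  set e := ((arr.filter (fun x => PySem.Int.mod x 2 = 0)).length : Int) with he
  set o := ((arr.filter (fun x => PySem.Int.mod x 2 ≠ 0)).length : Int) with ho
  set se := (arr.filter (fun x => PySem.Int.mod x 2 = 0)).sum with hse
  set so := (arr.filter (fun x => PySem.Int.mod x 2 ≠ 0)).sum with hso
  split_ifs with a1 a2 a3 b1 b2 b3 b4 b5 b6 b7 b8 _ <;> try omega
  all_goals
    first
    | (rw [abs_of_pos (by omega)]; ring)
    | (rw [abs_of_nonpos (by omega)]; ring)
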